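-- pv_equiv track=rewrite | github.com/derkaal/europeanconsortium | src/consortium/utils/report_templates.py | generate_implementation_roadmap
-- ===== SOURCE A (Python) =====
-- from typing import Dict, List, Any, Optional
--
-- def generate_implementation_roadmap(action_items: List[Dict[str, Any]]) -> str:
--     """
--     Generate implementation roadmap from action items.
--
--     Args:
--         action_items: List of action items with priorities
--
--     Returns:
--         Implementation roadmap text
--     """
--     roadmap = "IMPLEMENTATION ROADMAP\n\n"
--
--     # Group by priority
--     critical = [a for a in action_items if a.get('priority') == 'CRITICAL']
--     high = [a for a in action_items if a.get('priority') == 'HIGH']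
--     medium = [a for a in action_items if a.get('priority') == 'MEDIUM']
--     low = [a for a in action_items if a.get('priority') == 'LOW']
--
--     if critical:
--         roadmap += "PHASE 1: CRITICAL (Pre-Decision Requirements)\n"
--         roadmap += "These items BLOCK the decision and must be resolved before proceeding.\n\n"
--         for i, action in enumerate(critical, 1):
--             roadmap += format_action_item(i, action)
--         roadmap += "\n"
--
--     if high:
--         roadmap += "PHASE 2: HIGH PRIORITY (Early Implementation)\n"
--         roadmap += "Address these items in the first 30 days of implementation.\n\n"
--         for i, action in enumerate(high, 1):
--             roadmap += format_action_item(i, action)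
--         roadmap += "\n"
--
--     if medium:
--         roadmap += "PHASE 3: MEDIUM PRIORITY (Ongoing Implementation)\n"
--         roadmap += "Address these items within the first 90 days.\n\n"
--         for i, action in enumerate(medium, 1):
--             roadmap += format_action_item(i, action)
--         roadmap += "\n"
--
--     if low:
--         roadmap += "PHASE 4: LOW PRIORITY (Optimization)\n"
--         roadmap += "These are ongoing improvements and optimizations.\n\n"
--         for i, action in enumerate(low, 1):
--             roadmap += format_action_item(i, action)
--         roadmap += "\n"
--
--     return roadmap
--
-- def format_action_item(index: int, action: Dict[str, Any]) -> str:
--     """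
--     Format a single action item for roadmap.
--
--     Args:
--         index: Item number
--         action: Action item dictionary
--
--     Returns:
--         Formatted action item text
--     """
--     action_text = action.get('action', 'No action specified')
--     owner = action.get('owner', 'Not assigned')
--     details = action.get('details', '')
--
--     item = f"{index}. {action_text}\n"
--     item += f"   Responsible: {owner}\n"
--     if details:
--         item += f"   Details: {details}\n"
--     item += "\n"
--
--     return item
-- ===== SOURCE B (Python) =====
-- _RANK = {'CRITICAL': 0, 'HIGH': 1, 'MEDIUM': 2, 'LOW': 3}
--
-- _PHASES = [
--     ("PHASE 1: CRITICAL (Pre-Decision Requirements)\n",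
--      "These items BLOCK the decision and must be resolved before proceeding.\n\n"),
--     ("PHASE 2: HIGH PRIORITY (Early Implementation)\n",
--      "Address these items in the first 30 days of implementation.\n\n"),
--     ("PHASE 3: MEDIUM PRIORITY (Ongoing Implementation)\n",
--      "Address these items within the first 90 days.\n\n"),
--     ("PHASE 4: LOW PRIORITY (Optimization)\n",
--      "These are ongoing improvements and optimizations.\n\n"),
-- ]
--
-- def generate_implementation_roadmap(action_items):
--     # Decorate-sort-scan: tag each relevant item with its phase rank, stable-sort
--     # once by rank, then emit everything in a single run-detecting scan.
--     decorated = [(_RANK[a.get('priority')], a) for a in action_items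
--                  if a.get('priority') in _RANK]
--     decorated.sort(key=lambda t: t[0])
--
--     roadmap = "IMPLEMENTATION ROADMAP\n\n"
--     prev = -1
--     count = 0
--     for rank, action in decorated:
--         if rank != prev:
--             if prev != -1:
--                 roadmap += "\n"
--             header, desc = _PHASES[rank]
--             roadmap += header + desc
--             prev, count = rank, 1
--         else:
--             count += 1
--         roadmap += format_action_item(count, action)
--     if prev != -1:
--         roadmap += "\n"
--     return roadmap
--
-- def format_action_item(index, action):
--     action_text = action.get('action', 'No action specified')
--     owner = action.get('owner', 'Not assigned')
--     details = action.get('details', '')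
--
--     item = f"{index}. {action_text}\n"
--     item += f"   Responsible: {owner}\n"
--     if details:
--         item += f"   Details: {details}\n"
--     item += "\n"
--     return item
-- ===== Notes on version B (the rewrite author's own statement) =====
-- stated objective: alternative
-- what changed: B replaces A's four separate priority-filter passes and four copy-pasted emission blocks by decorate-sort-scan: it tags each relevant item with a numeric phase rank, stable-sorts once by rank, and emits the whole roadmap in a single run-detecting scan that opens a phase whenever the rank changes.
import Mathlib
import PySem

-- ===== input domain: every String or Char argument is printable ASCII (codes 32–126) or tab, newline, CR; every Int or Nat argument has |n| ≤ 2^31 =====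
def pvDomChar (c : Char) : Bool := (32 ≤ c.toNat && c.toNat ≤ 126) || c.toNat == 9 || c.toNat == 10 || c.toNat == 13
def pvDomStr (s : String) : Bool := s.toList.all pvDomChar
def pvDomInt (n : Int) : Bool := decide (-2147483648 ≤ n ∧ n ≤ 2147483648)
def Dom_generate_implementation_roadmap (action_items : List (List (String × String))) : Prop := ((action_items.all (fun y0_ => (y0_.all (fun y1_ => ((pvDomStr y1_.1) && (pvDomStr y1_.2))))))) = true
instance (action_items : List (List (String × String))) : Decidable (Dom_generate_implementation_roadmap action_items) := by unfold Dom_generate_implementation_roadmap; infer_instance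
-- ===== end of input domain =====

-- B replaces A's four filter passes and four pasted emission blocks by decorate-sort-scan:
-- tag items with a phase rank, stable-sort once by rank, emit in one run-detecting scan.

-- ===== PORT A =====
-- shared helper: format_action_item (identical in Source A and Source B)
def pvFormatActionItem (index : Int) (action : List (String × String)) : String :=
  let action_text := (PySem.Dict.mk action).getD "action" "No action specified"
  let owner := (PySem.Dict.mk action).getD "owner" "Not assigned"
  let details := (PySem.Dict.mk action).getD "details" ""
  PySem.Int.toStr index ++ ". " ++ action_text ++ "\n"
    ++ "   Responsible: " ++ owner ++ "\n"
    ++ (if details ≠ "" then "   Details: " ++ details ++ "\n" else "")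
    ++ "\n"

def generate_implementation_roadmap (action_items : List (List (String × String))) : String :=
  let critical := action_items.filter (fun a => (PySem.Dict.mk a).get? "priority" == some "CRITICAL")
  let high := action_items.filter (fun a => (PySem.Dict.mk a).get? "priority" == some "HIGH")
  let medium := action_items.filter (fun a => (PySem.Dict.mk a).get? "priority" == some "MEDIUM")
  let low := action_items.filter (fun a => (PySem.Dict.mk a).get? "priority" == some "LOW")
  let roadmap := "IMPLEMENTATION ROADMAP\n\n"
  let roadmap := if critical ≠ [] then
      ((PySem.List.enumerate critical 1).foldl (fun r p => r ++ pvFormatActionItem p.1 p.2)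
        (roadmap ++ "PHASE 1: CRITICAL (Pre-Decision Requirements)\n"
          ++ "These items BLOCK the decision and must be resolved before proceeding.\n\n")) ++ "\n"
    else roadmap
  let roadmap := if high ≠ [] then
      ((PySem.List.enumerate high 1).foldl (fun r p => r ++ pvFormatActionItem p.1 p.2)
        (roadmap ++ "PHASE 2: HIGH PRIORITY (Early Implementation)\n"
          ++ "Address these items in the first 30 days of implementation.\n\n")) ++ "\n"
    else roadmap
  let roadmap := if medium ≠ [] then
      ((PySem.List.enumerate medium 1).foldl (fun r p => r ++ pvFormatActionItem p.1 p.2)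
        (roadmap ++ "PHASE 3: MEDIUM PRIORITY (Ongoing Implementation)\n"
          ++ "Address these items within the first 90 days.\n\n")) ++ "\n"
    else roadmap
  let roadmap := if low ≠ [] then
      ((PySem.List.enumerate low 1).foldl (fun r p => r ++ pvFormatActionItem p.1 p.2)
        (roadmap ++ "PHASE 4: LOW PRIORITY (Optimization)\n"
          ++ "These are ongoing improvements and optimizations.\n\n")) ++ "\n"
    else roadmap
  roadmap

-- ===== PORT B =====
-- _RANK lookup: rank of a priority value, none when not in the table
def pvRank? (p : Option String) : Option Int :=
  match p with
  | none => none
  | some s =>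
    if s = "CRITICAL" then some 0
    else if s = "HIGH" then some 1
    else if s = "MEDIUM" then some 2
    else if s = "LOW" then some 3
    else none

-- _PHASES[rank] (ranks are always 0..3 where used)
def pvPhase (r : Int) : String × String :=
  if r = 0 then
    ("PHASE 1: CRITICAL (Pre-Decision Requirements)\n",
     "These items BLOCK the decision and must be resolved before proceeding.\n\n")
  else if r = 1 then
    ("PHASE 2: HIGH PRIORITY (Early Implementation)\n",
     "Address these items in the first 30 days of implementation.\n\n")
  else if r = 2 then
    ("PHASE 3: MEDIUM PRIORITY (Ongoing Implementation)\n",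
     "Address these items within the first 90 days.\n\n")
  else if r = 3 then
    ("PHASE 4: LOW PRIORITY (Optimization)\n",
     "These are ongoing improvements and optimizations.\n\n")
  else ("", "")

-- loop body of B's single scan; state = (prev, count, roadmap)
def pvScanStep (s : Int × Int × String) (p : Int × List (String × String)) :
    Int × Int × String :=
  let s' := if p.1 ≠ s.1 then
      (p.1, (1 : Int),
        s.2.2 ++ (if s.1 ≠ -1 then "\n" else "") ++ (pvPhase p.1).1 ++ (pvPhase p.1).2)
    else (s.1, s.2.1 + 1, s.2.2)
  (s'.1, s'.2.1, s'.2.2 ++ pvFormatActionItem s'.2.1 p.2)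

def generate_implementation_roadmap_alt (action_items : List (List (String × String))) : String :=
  let decorated :=
    (action_items.filter (fun a => (pvRank? ((PySem.Dict.mk a).get? "priority")).isSome)).map
      (fun a => ((pvRank? ((PySem.Dict.mk a).get? "priority")).getD 0, a))
  let decorated := PySem.List.sorted decorated (fun t => t.1)
  let st := decorated.foldl pvScanStep (-1, 0, "IMPLEMENTATION ROADMAP\n\n")
  st.2.2 ++ (if st.1 ≠ -1 then "\n" else "")

-- ===== PRECONDITION & SPEC =====
def Spec_generate_implementation_roadmap (action_items : List (List (String × String))) (out : String) : Prop := out = generate_implementation_roadmap_alt action_items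
instance (action_items : List (List (String × String))) (out : String) : Decidable (Spec_generate_implementation_roadmap action_items out) := by unfold Spec_generate_implementation_roadmap; infer_instance

-- ===== CLAIM =====
def Claim_equal_generate_implementation_roadmap : Prop := ∀ (action_items : List (List (String × String))), Dom_generate_implementation_roadmap action_items → Spec_generate_implementation_roadmap action_items (generate_implementation_roadmap action_items)

-- ===== LEMMAS AND PROOFS =====

-- 1 -- pvRank? characterisations
theorem pvRank?_eq_zero (g : Option String) : pvRank? g = some 0 ↔ g = some "CRITICAL" := by
  cases g with
  | none => simp [pvRank?]
  | some s => simp only [pvRank?]; split_ifs with h1 h2 h3 h4 <;> simp_all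

theorem pvRank?_eq_one (g : Option String) : pvRank? g = some 1 ↔ g = some "HIGH" := by
  cases g with
  | none => simp [pvRank?]
  | some s => simp only [pvRank?]; split_ifs with h1 h2 h3 h4 <;> simp_all

theorem pvRank?_eq_two (g : Option String) : pvRank? g = some 2 ↔ g = some "MEDIUM" := by
  cases g with
  | none => simp [pvRank?]
  | some s => simp only [pvRank?]; split_ifs with h1 h2 h3 h4 <;> simp_all

theorem pvRank?_eq_three (g : Option String) : pvRank? g = some 3 ↔ g = some "LOW" := by
  cases g with
  | none => simp [pvRank?]
  | some s => simp only [pvRank?]; split_ifs with h1 h2 h3 h4 <;> simp_all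

theorem pvRank?_mem (g : Option String) (r : Int) (h : pvRank? g = some r) :
    r = 0 ∨ r = 1 ∨ r = 2 ∨ r = 3 := by
  cases g with
  | none => simp [pvRank?] at h
  | some s =>
    simp only [pvRank?] at h
    split_ifs at h <;> simp_all

-- 2 -- stable insertion of a key-k element into key-grouped lists
theorem pv_insert_mid (x : Int × List (String × String))
    (l r : List (Int × List (String × String)))
    (hl : ∀ y ∈ l, ¬ (x.1 < y.1)) (hr : ∀ y ∈ r, x.1 < y.1) :
    PySem.List.insertBy (fun a b => decide (a.1 < b.1)) x (l ++ r) = l ++ x :: r := by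
  induction l with
  | nil =>
    cases r with
    | nil => rfl
    | cons y t =>
      simp only [List.nil_append, PySem.List.insertBy]
      rw [if_pos (by simpa using hr y (by simp))]
  | cons z l ih =>
    simp only [List.cons_append, PySem.List.insertBy]
    rw [if_neg (by simpa using hl z (by simp))]
    simp [ih (fun y hy => hl y (by simp [hy]))]

-- elements of a group stay at their key after appending one more key-k element
theorem pv_append_key (c : List (Int × List (String × String)))
    (x : Int × List (String × String)) (k : Int)
    (hc : ∀ p ∈ c, p.1 = k) (hx : x.1 = k) : ∀ p ∈ c ++ [x], p.1 = k := by
  intro p hp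
  rcases List.mem_append.mp hp with h | h
  · exact hc p h
  · simp at h; rw [h]; exact hx

-- 3 -- the insertion-sort fold fills the four key groups with the filters, in order
theorem pv_sorted_groups (xs : List (Int × List (String × String)))
    (c0 c1 c2 c3 : List (Int × List (String × String)))
    (h0 : ∀ p ∈ c0, p.1 = 0) (h1 : ∀ p ∈ c1, p.1 = 1)
    (h2 : ∀ p ∈ c2, p.1 = 2) (h3 : ∀ p ∈ c3, p.1 = 3)
    (hxs : ∀ p ∈ xs, p.1 = 0 ∨ p.1 = 1 ∨ p.1 = 2 ∨ p.1 = 3) :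
    xs.foldl (fun acc x => PySem.List.insertBy (fun a b => decide (a.1 < b.1)) x acc)
        (c0 ++ c1 ++ c2 ++ c3)
      = (c0 ++ xs.filter (fun p => p.1 == 0)) ++ (c1 ++ xs.filter (fun p => p.1 == 1))
        ++ (c2 ++ xs.filter (fun p => p.1 == 2)) ++ (c3 ++ xs.filter (fun p => p.1 == 3)) := by
  induction xs generalizing c0 c1 c2 c3 with
  | nil => simp
  | cons x xs ih =>
    simp only [List.foldl_cons, List.filter_cons]
    rcases hxs x (by simp) with hk | hk | hk | hk
    · have hins : PySem.List.insertBy (fun a b => decide (a.1 < b.1)) x (c0 ++ c1 ++ c2 ++ c3)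
          = (c0 ++ [x]) ++ c1 ++ c2 ++ c3 := by
        have := pv_insert_mid x c0 (c1 ++ c2 ++ c3)
          (fun y hy => by rw [hk, h0 y hy]; omega)
          (fun y hy => by
            rw [hk]
            rcases (List.mem_append.mp hy) with hy' | hy'
            · rcases (List.mem_append.mp hy') with hy'' | hy''
              · rw [h1 y hy'']; omega
              · rw [h2 y hy'']; omega
            · rw [h3 y hy']; omega)
        simpa [List.append_assoc] using this
      rw [hins, ih _ _ _ _ (pv_append_key _ x 0 h0 hk) h1 h2 h3
          (fun p hp => hxs p (by simp [hp]))]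
      simp [hk, List.append_assoc]
    · have hins : PySem.List.insertBy (fun a b => decide (a.1 < b.1)) x (c0 ++ c1 ++ c2 ++ c3)
          = c0 ++ (c1 ++ [x]) ++ c2 ++ c3 := by
        have := pv_insert_mid x (c0 ++ c1) (c2 ++ c3)
          (fun y hy => by
            rw [hk]
            rcases List.mem_append.mp hy with hy' | hy'
            · rw [h0 y hy']; omega
            · rw [h1 y hy']; omega)
          (fun y hy => by
            rw [hk]
            rcases List.mem_append.mp hy with hy' | hy'
            · rw [h2 y hy']; omega
            · rw [h3 y hy']; omega)
        simpa [List.append_assoc] using this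
      rw [hins, ih _ _ _ _ h0 (pv_append_key _ x 1 h1 hk) h2 h3
          (fun p hp => hxs p (by simp [hp]))]
      simp [hk, List.append_assoc]
    · have hins : PySem.List.insertBy (fun a b => decide (a.1 < b.1)) x (c0 ++ c1 ++ c2 ++ c3)
          = c0 ++ c1 ++ (c2 ++ [x]) ++ c3 := by
        have := pv_insert_mid x (c0 ++ c1 ++ c2) c3
          (fun y hy => by
            rw [hk]
            rcases List.mem_append.mp hy with hy' | hy'
            · rcases List.mem_append.mp hy' with hy'' | hy''
              · rw [h0 y hy'']; omega
              · rw [h1 y hy'']; omega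
            · rw [h2 y hy']; omega)
          (fun y hy => by rw [hk, h3 y hy]; omega)
        simpa [List.append_assoc] using this
      rw [hins, ih _ _ _ _ h0 h1 (pv_append_key _ x 2 h2 hk) h3
          (fun p hp => hxs p (by simp [hp]))]
      simp [hk, List.append_assoc]
    · have hins : PySem.List.insertBy (fun a b => decide (a.1 < b.1)) x (c0 ++ c1 ++ c2 ++ c3)
          = c0 ++ c1 ++ c2 ++ (c3 ++ [x]) := by
        have := pv_insert_mid x (c0 ++ c1 ++ c2 ++ c3) []
          (fun y hy => by
            rw [hk]
            rcases List.mem_append.mp hy with hy' | hy'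
            · rcases List.mem_append.mp hy' with hy'' | hy''
              · rcases List.mem_append.mp hy'' with h | h
                · rw [h0 y h]; omega
                · rw [h1 y h]; omega
              · rw [h2 y hy'']; omega
            · rw [h3 y hy']; omega)
          (by simp)
        simpa [List.append_assoc] using this
      rw [hins, ih _ _ _ _ h0 h1 h2 (pv_append_key _ x 3 h3 hk)
          (fun p hp => hxs p (by simp [hp]))]
      simp [hk, List.append_assoc]

-- the items A's four sections list, in B's decoration
def pvDec (action_items : List (List (String × String))) :
    List (Int × List (String × String)) :=
  (action_items.filter (fun a => (pvRank? ((PySem.Dict.mk a).get? "priority")).isSome)).map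
    (fun a => ((pvRank? ((PySem.Dict.mk a).get? "priority")).getD 0, a))

theorem pvDec_ranks (action_items : List (List (String × String))) :
    ∀ p ∈ pvDec action_items, p.1 = 0 ∨ p.1 = 1 ∨ p.1 = 2 ∨ p.1 = 3 := by
  intro p hp
  simp only [pvDec, List.mem_map, List.mem_filter] at hp
  obtain ⟨a, ⟨_, ha⟩, rfl⟩ := hp
  rcases hr : pvRank? ((PySem.Dict.mk a).get? "priority") with _ | r
  · simp [hr] at ha
  · simpa [hr] using pvRank?_mem _ r hr

-- 4 -- each rank-filter of the decoration is the corresponding priority filter, tagged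
theorem pvDec_filter (action_items : List (List (String × String))) (r : Int) (key : String)
    (hiff : ∀ g, pvRank? g = some r ↔ g = some key) :
    (pvDec action_items).filter (fun p => p.1 == r)
      = (action_items.filter (fun a => (PySem.Dict.mk a).get? "priority" == some key)).map
          (fun a => (r, a)) := by
  induction action_items with
  | nil => rfl
  | cons a t ih =>
    simp only [pvDec, List.filter_cons] at *
    rcases hg : pvRank? ((PySem.Dict.mk a).get? "priority") with _ | k
    · have hne : ((PySem.Dict.mk a).get? "priority" == some key) = false := by
        by_contra h
        have : (PySem.Dict.mk a).get? "priority" = some key := by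
          simpa using (Bool.not_eq_false _).mp h
        rw [(hiff _).mpr this] at hg; simp at hg
      simp [hne, ih]
    · by_cases hk : k = r
      · subst hk
        have heq : (PySem.Dict.mk a).get? "priority" = some key := (hiff _).mp hg
        rw [heq] at hg
        simp [hg, heq, ih]
      · have hne : ((PySem.Dict.mk a).get? "priority" == some key) = false := by
          by_contra h
          have : (PySem.Dict.mk a).get? "priority" = some key := by
            simpa using (Bool.not_eq_false _).mp h
          rw [(hiff _).mpr this] at hg
          have hkr : r = k := by simpa using hg
          exact hk hkr.symm
        simp [hg, hne, hk, ih]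

-- 5 -- A's per-section emission as a structural recursion
def pvEmit (l : List (List (String × String))) (k : Int) : String :=
  match l with
  | [] => ""
  | a :: t => pvFormatActionItem k a ++ pvEmit t (k + 1)

theorem pv_enum_fold (l : List (List (String × String))) (k : Int) (s : String) :
    (PySem.List.enumerate l k).foldl (fun r p => r ++ pvFormatActionItem p.1 p.2) s
      = s ++ pvEmit l k := by
  induction l generalizing k s with
  | nil => simp [pvEmit, PySem.List.enumerate]
  | cons a t ih =>
    rw [PySem.List.enumerate_cons]
    simp only [List.foldl_cons, ih, pvEmit, String.append_assoc]

-- 6 -- scanning a run whose rank equals the current phase just numbers and appends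
theorem pv_scan_run (l : List (List (String × String))) (r c : Int) (acc : String) :
    (l.map (fun a => (r, a))).foldl pvScanStep (r, c, acc)
      = (r, c + (l.length : Int), acc ++ pvEmit l (c + 1)) := by
  induction l generalizing c acc with
  | nil => simp [pvEmit]
  | cons a t ih =>
    simp only [List.map_cons, List.foldl_cons]
    rw [show pvScanStep (r, c, acc) (r, a) = (r, c + 1, acc ++ pvFormatActionItem (c + 1) a)
      from by simp [pvScanStep]]
    rw [ih]
    simp only [pvEmit, Prod.mk.injEq, List.length_cons, String.append_assoc,
      Nat.cast_add, Nat.cast_one, true_and, and_true]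
    ring

-- 7 -- scanning a nonempty run of a new rank opens the phase then numbers from 1
theorem pv_scan_phase (l : List (List (String × String))) (hl : l ≠ [])
    (prev c : Int) (acc : String) (r : Int) (hr : r ≠ prev) :
    (l.map (fun a => (r, a))).foldl pvScanStep (prev, c, acc)
      = (r, (l.length : Int),
          acc ++ (if prev ≠ -1 then "\n" else "") ++ (pvPhase r).1 ++ (pvPhase r).2
            ++ pvEmit l 1) := by
  cases l with
  | nil => exact absurd rfl hl
  | cons a t =>
    simp only [List.map_cons, List.foldl_cons]
    rw [show pvScanStep (prev, c, acc) (r, a)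
        = (r, 1, acc ++ (if prev ≠ -1 then "\n" else "") ++ (pvPhase r).1 ++ (pvPhase r).2
            ++ pvFormatActionItem 1 a)
      from by simp [pvScanStep, hr, String.append_assoc]]
    rw [pv_scan_run]
    simp [pvEmit, String.append_assoc]
    omega

theorem pv_main (items : List (List (String × String))) :
    generate_implementation_roadmap items = generate_implementation_roadmap_alt items := by
  have hsort : PySem.List.sorted (pvDec items) (fun t => t.1)
      = (items.filter (fun a => (PySem.Dict.mk a).get? "priority" == some "CRITICAL")).map (fun a => ((0 : Int), a))
        ++ (items.filter (fun a => (PySem.Dict.mk a).get? "priority" == some "HIGH")).map (fun a => ((1 : Int), a))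
        ++ (items.filter (fun a => (PySem.Dict.mk a).get? "priority" == some "MEDIUM")).map (fun a => ((2 : Int), a))
        ++ (items.filter (fun a => (PySem.Dict.mk a).get? "priority" == some "LOW")).map (fun a => ((3 : Int), a)) := by
    rw [PySem.List.sorted_eq_foldl_insertBy]
    have h := pv_sorted_groups (pvDec items) [] [] [] [] (by simp) (by simp) (by simp)
      (by simp) (pvDec_ranks items)
    simp only [List.nil_append] at h
    rw [h, pvDec_filter items 0 "CRITICAL" pvRank?_eq_zero,
        pvDec_filter items 1 "HIGH" pvRank?_eq_one,
        pvDec_filter items 2 "MEDIUM" pvRank?_eq_two,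
        pvDec_filter items 3 "LOW" pvRank?_eq_three]
  have halt : generate_implementation_roadmap_alt items
      = (let st := (PySem.List.sorted (pvDec items) (fun t => t.1)).foldl pvScanStep
            (-1, 0, "IMPLEMENTATION ROADMAP\n\n")
         st.2.2 ++ (if st.1 ≠ -1 then "\n" else "")) := rfl
  rw [halt, hsort]
  by_cases h0 : items.filter (fun a => (PySem.Dict.mk a).get? "priority" == some "CRITICAL") = [] <;>
  by_cases h1 : items.filter (fun a => (PySem.Dict.mk a).get? "priority" == some "HIGH") = [] <;>
  by_cases h2 : items.filter (fun a => (PySem.Dict.mk a).get? "priority" == some "MEDIUM") = [] <;>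
  by_cases h3 : items.filter (fun a => (PySem.Dict.mk a).get? "priority" == some "LOW") = [] <;>
    simp [generate_implementation_roadmap, List.foldl_append, h0, h1, h2, h3,
      pv_scan_phase, pv_enum_fold, pvPhase, String.append_assoc]

-- ===== VERDICT =====
theorem generate_implementation_roadmap_spec : Claim_equal_generate_implementation_roadmap := by
  intro items _
  exact pv_main items
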